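-- pv_equiv track=rewrite | github.com/p2jason/dragonito | table_gen.py | compress_coeff_table
-- ===== SOURCE A (Python) =====
-- def compress_coeff_table(table):
-- 	index_table = []
-- 	coeff_table = []
--
-- 	for e in range(len(table)):
-- 		cur_row = table[e]
--
-- 		start = 0
-- 		end = len(cur_row)
-- 		idx = len(coeff_table)
--
-- 		# Trim start
-- 		while start < end:
-- 			coeff = cur_row[start]
--
-- 			if coeff == (0, 0, 0, 0):
-- 				start += 1
-- 			else:
-- 				break
--
-- 		# Trim end
-- 		while start < end:
-- 			coeff = cur_row[end - 1]
--
-- 			if coeff == (0, 0, 0, 0):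
-- 				end -= 1
-- 			else:
-- 				break
--
-- 		# Append the trimmed row to the coeff table
-- 		coeff_table.extend(cur_row[start:end])
-- 		index_table.append((idx, start, end))
--
-- 		# Sanity check
-- 		if start >= end:
-- 			raise Exception("Uhhh... `start >= end` doesn't make sense. It would be the row is all zeros (or there's a bug in the compression method)")
--
-- 	return coeff_table, index_table
-- ===== SOURCE B (Python) =====
-- def compress_coeff_table(table):
-- 	# Two-phase: find each row's non-zero span first, then build both tables.
-- 	spans = []
-- 	for row in table:
-- 		nz = [i for i, c in enumerate(row) if c != (0, 0, 0, 0)]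
-- 		if not nz:
-- 			raise Exception("Uhhh... `start >= end` doesn't make sense. It would be the row is all zeros (or there's a bug in the compression method)")
-- 		spans.append((nz[0], nz[-1] + 1))
--
-- 	coeff_table = [c for row, (s, e) in zip(table, spans) for c in row[s:e]]
--
-- 	index_table = []
-- 	off = 0
-- 	for (s, e) in spans:
-- 		index_table.append((off, s, e))
-- 		off += e - s
--
-- 	return coeff_table, index_table
-- ===== Notes on version B (the rewrite author's own statement) =====
-- stated objective: simpler
-- what changed: Replaces A's two index-walking while-loops per row by a single comprehension collecting non-zero positions (span = first/last of that list), and splits the construction into two phases: spans first, then the coefficient table by one flat comprehension and the index table by a running-offset loop.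
import Mathlib
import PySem

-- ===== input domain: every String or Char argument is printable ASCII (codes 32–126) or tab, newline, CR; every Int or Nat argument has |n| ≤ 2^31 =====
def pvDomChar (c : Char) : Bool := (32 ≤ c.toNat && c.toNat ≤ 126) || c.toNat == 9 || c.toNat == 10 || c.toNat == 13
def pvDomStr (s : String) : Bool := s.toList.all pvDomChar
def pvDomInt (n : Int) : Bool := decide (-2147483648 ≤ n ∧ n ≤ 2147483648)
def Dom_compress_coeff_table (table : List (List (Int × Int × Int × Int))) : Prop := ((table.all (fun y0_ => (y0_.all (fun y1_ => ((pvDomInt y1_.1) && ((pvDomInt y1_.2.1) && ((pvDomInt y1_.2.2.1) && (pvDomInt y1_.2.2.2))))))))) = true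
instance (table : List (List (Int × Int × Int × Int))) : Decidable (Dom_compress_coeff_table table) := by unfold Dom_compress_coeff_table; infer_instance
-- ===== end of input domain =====

-- B is a two-phase decomposition (collect each row's non-zero span first, then build both
-- tables from the spans); same cost, chosen for clarity ('simpler'), not speed.

-- ===== PORT A =====

def pvZero : Int × Int × Int × Int := (0, 0, 0, 0)

-- the `while start < end: … start += 1` trim loop of A
def trimStartA (row : List (Int × Int × Int × Int)) (s e : Nat) : Nat :=
  if h : s < e then
    if row.getD s pvZero = pvZero then trimStartA row (s + 1) e else s
  else s
termination_by e - s

-- the `while start < end: … end -= 1` trim loop of A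
def trimEndA (row : List (Int × Int × Int × Int)) (s e : Nat) : Nat :=
  if h : s < e then
    if row.getD (e - 1) pvZero = pvZero then trimEndA row s (e - 1) else e
  else e
termination_by e

-- cur_row[start:end] with 0 ≤ start ≤ end ≤ len is exactly drop/take
def compress_coeff_table (table : List (List (Int × Int × Int × Int))) : (List (Int × Int × Int × Int)) × (List (Int × Int × Int)) :=
  table.foldl (fun st row =>
    let s := trimStartA row 0 row.length
    let e := trimEndA row s row.length
    let idx := st.1.length
    (st.1 ++ (row.drop s).take (e - s), st.2 ++ [((idx : Int), (s : Int), (e : Int))]))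
    ([], [])

-- ===== PORT B =====

-- `[i for i, c in enumerate(row) if c != (0,0,0,0)]`
def pvNZIdx (row : List (Int × Int × Int × Int)) : List Nat :=
  ((row.zipIdx).filter (fun p => decide (p.1 ≠ pvZero))).map Prod.snd

-- `(nz[0], nz[-1] + 1)`; all-zero rows raise in Python (excluded by Pre_)
def pvSpanB (row : List (Int × Int × Int × Int)) : Nat × Nat :=
  let nz := pvNZIdx row
  (nz.headD 0, nz.getLastD 0 + 1)

def compress_coeff_table_alt (table : List (List (Int × Int × Int × Int))) : (List (Int × Int × Int × Int)) × (List (Int × Int × Int)) :=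
  let spans := table.map pvSpanB
  let coeff := (table.zip spans).flatMap (fun rse => (rse.1.drop rse.2.1).take (rse.2.2 - rse.2.1))
  let index := (spans.foldl
      (fun (st : List (Int × Int × Int) × Nat) se =>
        (st.1 ++ [((st.2 : Int), (se.1 : Int), (se.2 : Int))], st.2 + (se.2 - se.1)))
      ([], 0)).1
  (coeff, index)

-- ===== PRECONDITION & SPEC =====
-- Pre_ excludes exactly the inputs on which A raises its Exception: tables with an empty or
-- all-zero row (both A and B raise there).
def Pre_compress_coeff_table (table : List (List (Int × Int × Int × Int))) : Prop :=
  ∀ row ∈ table, ∃ c ∈ row, c ≠ pvZero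
instance (table : List (List (Int × Int × Int × Int))) : Decidable (Pre_compress_coeff_table table) := by unfold Pre_compress_coeff_table; infer_instance

def pvWitness_compress_coeff_table : (List (List (Int × Int × Int × Int))) :=
  [[(0, 0, 0, 0), (1, 2, 3, 4), (0, 0, 0, 0)], [(5, 0, 0, 0)]]

def Spec_compress_coeff_table (table : List (List (Int × Int × Int × Int))) (out : (List (Int × Int × Int × Int)) × (List (Int × Int × Int))) : Prop := out = compress_coeff_table_alt table
instance (table : List (List (Int × Int × Int × Int))) (out : (List (Int × Int × Int × Int)) × (List (Int × Int × Int))) : Decidable (Spec_compress_coeff_table table out) := by unfold Spec_compress_coeff_table; infer_instance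

-- ===== CLAIM (what is proved, stated in full; the proofs are below) =====
def Claim_equal_compress_coeff_table : Prop := ∀ (table : List (List (Int × Int × Int × Int))), Dom_compress_coeff_table table → Pre_compress_coeff_table table → Spec_compress_coeff_table table (compress_coeff_table table)

-- ===== LEMMAS AND PROOFS =====

def pvLead (row : List (Int × Int × Int × Int)) : Nat :=
  (row.takeWhile (fun c => decide (c = pvZero))).length

def pvTrail (row : List (Int × Int × Int × Int)) : Nat := pvLead row.reverse

def pvHasNZ (row : List (Int × Int × Int × Int)) : Prop := ∃ c ∈ row, c ≠ pvZero

def pvN (row : List (Int × Int × Int × Int)) (k : Nat) : List Nat :=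
  ((row.zipIdx k).filter (fun p => decide (p.1 ≠ pvZero))).map Prod.snd

def pvIdxGo : List (Nat × Nat) → Nat → List (Int × Int × Int)
  | [], _ => []
  | (se :: r), n => ((n : Int), (se.1 : Int), (se.2 : Int)) :: pvIdxGo r (n + (se.2 - se.1))

theorem pvN_zero (row : List (Int × Int × Int × Int)) : pvNZIdx row = pvN row 0 := rfl

theorem pvLead_cons (c : Int × Int × Int × Int) (t : List (Int × Int × Int × Int)) :
    pvLead (c :: t) = if c = pvZero then pvLead t + 1 else 0 := by
  simp only [pvLead, List.takeWhile]
  split_ifs with h <;> simp_all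

theorem pvLead_le (row : List (Int × Int × Int × Int)) : pvLead row ≤ row.length :=
  (List.takeWhile_prefix _).length_le

theorem pvHasNZ_of_cons_zero {a : Int × Int × Int × Int} {t : List (Int × Int × Int × Int)}
    (h : pvHasNZ (a :: t)) (ha : a = pvZero) : pvHasNZ t := by
  obtain ⟨c, hc, hne⟩ := h
  rcases List.mem_cons.mp hc with h1 | h2
  · exact absurd (h1 ▸ ha) hne
  · exact ⟨c, h2, hne⟩

theorem pvLead_append_hasNZ (xs ys : List (Int × Int × Int × Int)) (h : pvHasNZ xs) :
    pvLead (xs ++ ys) = pvLead xs := by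
  induction xs with
  | nil => obtain ⟨c, hc, _⟩ := h; simp at hc
  | cons a t ih =>
    by_cases ha : a = pvZero
    · have ht : pvHasNZ t := pvHasNZ_of_cons_zero h ha
      rw [List.cons_append, pvLead_cons, if_pos ha, ih ht, pvLead_cons, if_pos ha]
    · rw [List.cons_append, pvLead_cons, if_neg ha, pvLead_cons, if_neg ha]

theorem pvLead_append_allZ (xs ys : List (Int × Int × Int × Int)) (h : ∀ x ∈ xs, x = pvZero) :
    pvLead (xs ++ ys) = xs.length + pvLead ys := by
  induction xs with
  | nil => simp
  | cons a t ih =>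
    have ha : a = pvZero := h a (by simp)
    have ht : ∀ x ∈ t, x = pvZero := fun x hx => h x (by simp [hx])
    rw [List.cons_append, pvLead_cons, if_pos ha, ih ht]
    simp only [List.length_cons]; omega

theorem pvLead_spec (row : List (Int × Int × Int × Int)) (h : pvHasNZ row) :
    pvLead row < row.length ∧ row.getD (pvLead row) pvZero ≠ pvZero := by
  induction row with
  | nil => obtain ⟨c, hc, _⟩ := h; simp at hc
  | cons a t ih =>
    by_cases ha : a = pvZero
    · have ht : pvHasNZ t := pvHasNZ_of_cons_zero h ha
      obtain ⟨h1, h2⟩ := ih ht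
      constructor
      · rw [pvLead_cons, if_pos ha]; simp only [List.length_cons]; omega
      · rw [pvLead_cons, if_pos ha, List.getD_cons_succ]; exact h2
    · constructor
      · rw [pvLead_cons, if_neg ha]; simp
      · rw [pvLead_cons, if_neg ha, List.getD_cons_zero]; exact ha

theorem pvTrail_cons_hasNZ (c : Int × Int × Int × Int) (t : List (Int × Int × Int × Int))
    (h : pvHasNZ t) : pvTrail (c :: t) = pvTrail t := by
  have hr : pvHasNZ t.reverse := by
    obtain ⟨x, hx, hne⟩ := h; exact ⟨x, by simpa using hx, hne⟩
  rw [pvTrail, List.reverse_cons, pvLead_append_hasNZ _ _ hr, pvTrail]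

theorem pvTrail_cons_allZ (c : Int × Int × Int × Int) (t : List (Int × Int × Int × Int))
    (h : ∀ x ∈ t, x = pvZero) :
    pvTrail (c :: t) = if c = pvZero then t.length + 1 else t.length := by
  have h' : ∀ x ∈ t.reverse, x = pvZero := fun x hx => h x (by simpa using hx)
  rw [pvTrail, List.reverse_cons, pvLead_append_allZ _ _ h', List.length_reverse]
  have hc : pvLead [c] = if c = pvZero then 1 else 0 := by
    rw [pvLead_cons]; split_ifs <;> simp [pvLead]
  rw [hc]; split_ifs <;> omega

theorem pvLead_add_trail_lt (row : List (Int × Int × Int × Int)) (h : pvHasNZ row) :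
    pvLead row + pvTrail row < row.length := by
  induction row with
  | nil => obtain ⟨c, hc, _⟩ := h; simp at hc
  | cons a t ih =>
    by_cases hz : pvHasNZ t
    · have iht := ih hz
      rw [pvTrail_cons_hasNZ a t hz, pvLead_cons]
      split_ifs <;> simp only [List.length_cons] <;> omega
    · have ht : ∀ x ∈ t, x = pvZero := by
        intro x hx; by_contra hne; exact hz ⟨x, hx, hne⟩
      have ha : a ≠ pvZero := by
        obtain ⟨c, hc, hne⟩ := h
        rcases List.mem_cons.mp hc with h1 | h2
        · exact h1 ▸ hne
        · exact absurd (ht c h2) hne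
      rw [pvLead_cons, if_neg ha, pvTrail_cons_allZ a t ht, if_neg ha]
      simp

theorem pvTrail_lt (row : List (Int × Int × Int × Int)) (h : pvHasNZ row) :
    pvTrail row < row.length := by
  have := pvLead_add_trail_lt row h; omega

-- A's first trim loop computes s + (number of leading zeros from position s on)
theorem trimStartA_eq (row : List (Int × Int × Int × Int)) (s : Nat) :
    trimStartA row s row.length = s + pvLead (row.drop s) := by
  by_cases h : s < row.length
  · have hd : row.drop s = row.getD s pvZero :: row.drop (s + 1) := by
      rw [List.getD_eq_getElem _ _ h]
      exact List.drop_eq_getElem_cons h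
    rw [trimStartA, dif_pos h]
    by_cases hz : row.getD s pvZero = pvZero
    · rw [if_pos hz, trimStartA_eq row (s + 1), hd, pvLead_cons, if_pos hz]
      omega
    · rw [if_neg hz, hd, pvLead_cons, if_neg hz]; omega
  · rw [trimStartA, dif_neg h, List.drop_eq_nil_of_le (by omega)]
    simp [pvLead]
termination_by row.length - s

-- A's second trim loop, below a known non-zero position s
theorem trimEndA_eq (row : List (Int × Int × Int × Int)) (s : Nat)
    (hs : row.getD s pvZero ≠ pvZero) :
    ∀ e, s < e → e ≤ row.length → trimEndA row s e = e - pvTrail (row.take e) := by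
  intro e
  induction e with
  | zero => omega
  | succ n ih =>
    intro hse hlen
    have hn : n < row.length := by omega
    have htake : row.take (n + 1) = row.take n ++ [row.getD n pvZero] := by
      rw [List.getD_eq_getElem _ _ hn, List.take_add_one, List.getElem?_eq_getElem hn]
      rfl
    rw [trimEndA, dif_pos hse]
    simp only [Nat.add_sub_cancel]
    split_ifs with hz
    · have hsn : s < n := by
        rcases Nat.lt_or_ge s n with hlt | hge
        · exact hlt
        · have : s = n := by omega
          exact absurd (hge.antisymm (by omega) ▸ hz) hs
      have hzq : row[n]?.getD pvZero = pvZero := by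
        rw [← List.getD_eq_getElem?_getD]; exact hz
      have htr : pvTrail (row.take (n + 1)) = pvTrail (row.take n) + 1 := by
        rw [pvTrail, htake, List.reverse_append]
        simp [pvLead_cons, hzq, pvTrail]
      have hle : pvTrail (row.take n) ≤ n := by
        have h1 := pvLead_le (row.take n).reverse
        simp only [pvTrail]
        simp only [List.length_reverse, List.length_take] at h1
        omega
      rw [ih hsn (by omega), htr]
      omega
    · have hzq : ¬ row[n]?.getD pvZero = pvZero := by
        rw [← List.getD_eq_getElem?_getD]; exact hz
      have htr : pvTrail (row.take (n + 1)) = 0 := by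
        rw [pvTrail, htake, List.reverse_append]
        simp [pvLead_cons, hzq]
      rw [htr]
      omega

theorem pvN_cons (c : Int × Int × Int × Int) (t : List (Int × Int × Int × Int)) (k : Nat) :
    pvN (c :: t) k = if c = pvZero then pvN t (k + 1) else k :: pvN t (k + 1) := by
  by_cases h : c = pvZero
  · simp [pvN, List.zipIdx_cons, h]
  · simp [pvN, List.zipIdx_cons, h]

theorem pvN_allZ (t : List (Int × Int × Int × Int)) (h : ∀ x ∈ t, x = pvZero) :
    ∀ k, pvN t k = [] := by
  induction t with
  | nil => intro k; simp [pvN]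
  | cons a r ih =>
    intro k
    have ha : a = pvZero := h a (by simp)
    have hr : ∀ x ∈ r, x = pvZero := fun x hx => h x (by simp [hx])
    rw [pvN_cons, if_pos ha, ih hr]

theorem pvN_ne_nil (t : List (Int × Int × Int × Int)) (h : pvHasNZ t) :
    ∀ k, pvN t k ≠ [] := by
  induction t with
  | nil => obtain ⟨c, hc, _⟩ := h; simp at hc
  | cons a r ih =>
    intro k
    by_cases ha : a = pvZero
    · rw [pvN_cons, if_pos ha]
      exact ih (pvHasNZ_of_cons_zero h ha) (k + 1)
    · rw [pvN_cons, if_neg ha]; simp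

theorem pvN_headD (row : List (Int × Int × Int × Int)) (h : pvHasNZ row) :
    ∀ k, (pvN row k).headD 0 = k + pvLead row := by
  induction row with
  | nil => obtain ⟨c, hc, _⟩ := h; simp at hc
  | cons a t ih =>
    intro k
    by_cases ha : a = pvZero
    · have ht : pvHasNZ t := pvHasNZ_of_cons_zero h ha
      rw [pvN_cons, if_pos ha, ih ht (k + 1), pvLead_cons, if_pos ha]
      omega
    · rw [pvN_cons, if_neg ha, pvLead_cons, if_neg ha]
      simp

theorem pvN_getLastD (row : List (Int × Int × Int × Int)) (h : pvHasNZ row) :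
    ∀ k, (pvN row k).getLastD 0 = k + (row.length - 1 - pvTrail row) := by
  induction row with
  | nil => obtain ⟨c, hc, _⟩ := h; simp at hc
  | cons a t ih =>
    intro k
    by_cases ha : a = pvZero
    · have ht : pvHasNZ t := pvHasNZ_of_cons_zero h ha
      have hlt := pvTrail_lt t ht
      rw [pvN_cons, if_pos ha, ih ht (k + 1), pvTrail_cons_hasNZ a t ht]
      simp only [List.length_cons]; omega
    · by_cases hz : pvHasNZ t
      · have hne := pvN_ne_nil t hz (k + 1)
        have hlt := pvTrail_lt t hz
        rw [pvN_cons, if_neg ha, List.getLastD_cons, pvTrail_cons_hasNZ a t hz]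
        have hirr : (pvN t (k + 1)).getLastD k = (pvN t (k + 1)).getLastD 0 := by
          rw [List.getLastD_eq_getLast?, List.getLastD_eq_getLast?]
          obtain ⟨x, hx⟩ := Option.ne_none_iff_exists'.mp
            (mt List.getLast?_eq_none_iff.mp hne)
          rw [hx]; rfl
        rw [hirr, ih hz (k + 1)]
        simp only [List.length_cons]; omega
      · have ht : ∀ x ∈ t, x = pvZero := by
          intro x hx; by_contra hne; exact hz ⟨x, hx, hne⟩
        rw [pvN_cons, if_neg ha, pvN_allZ t ht (k + 1), pvTrail_cons_allZ a t ht, if_neg ha]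
        simp only [List.getLastD_cons, List.getLastD_nil, List.length_cons]
        omega

theorem pvSpanB_eq (row : List (Int × Int × Int × Int)) (h : pvHasNZ row) :
    pvSpanB row = (pvLead row, row.length - pvTrail row) := by
  have h1 := pvN_headD row h 0
  have h2 := pvN_getLastD row h 0
  have h3 := pvLead_add_trail_lt row h
  simp only [pvSpanB, pvN_zero, h1, h2, Prod.mk.injEq]
  constructor <;> omega

theorem pvSpanA_eq (row : List (Int × Int × Int × Int)) (h : pvHasNZ row) :
    trimStartA row 0 row.length = pvLead row ∧
      trimEndA row (pvLead row) row.length = row.length - pvTrail row := by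
  obtain ⟨hlt, hnz⟩ := pvLead_spec row h
  constructor
  · rw [trimStartA_eq row 0, List.drop_zero]; omega
  · rw [trimEndA_eq row (pvLead row) hnz row.length hlt (le_refl _), List.take_length]

theorem pvFoldlIdx (spans : List (Nat × Nat)) :
    ∀ (acc : List (Int × Int × Int)) (n : Nat),
      (spans.foldl
        (fun (st : List (Int × Int × Int) × Nat) se =>
          (st.1 ++ [((st.2 : Int), (se.1 : Int), (se.2 : Int))], st.2 + (se.2 - se.1)))
        (acc, n)).1 = acc ++ pvIdxGo spans n := by
  induction spans with
  | nil => intro acc n; simp [pvIdxGo]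
  | cons se r ih =>
    intro acc n
    rw [List.foldl_cons, ih, pvIdxGo, List.append_assoc]
    rfl

theorem pvFoldMain (table : List (List (Int × Int × Int × Int)))
    (h : ∀ row ∈ table, pvHasNZ row) :
    ∀ (coeff : List (Int × Int × Int × Int)) (idxt : List (Int × Int × Int)),
      table.foldl (fun st row =>
          let s := trimStartA row 0 row.length
          let e := trimEndA row s row.length
          let idx := st.1.length
          (st.1 ++ (row.drop s).take (e - s), st.2 ++ [((idx : Int), (s : Int), (e : Int))]))
        (coeff, idxt)
      = (coeff ++ (table.zip (table.map pvSpanB)).flatMap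
            (fun rse => (rse.1.drop rse.2.1).take (rse.2.2 - rse.2.1)),
         idxt ++ pvIdxGo (table.map pvSpanB) coeff.length) := by
  induction table with
  | nil => intro coeff idxt; simp [pvIdxGo]
  | cons row t ih =>
    intro coeff idxt
    have hrow : pvHasNZ row := h row (by simp)
    have ht : ∀ r ∈ t, pvHasNZ r := fun r hr => h r (by simp [hr])
    obtain ⟨hA1, hA2⟩ := pvSpanA_eq row hrow
    have hB := pvSpanB_eq row hrow
    have hlt := pvLead_add_trail_lt row hrow
    have hlen : ((row.drop (pvLead row)).take (row.length - pvTrail row - pvLead row)).length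
        = row.length - pvTrail row - pvLead row := by
      simp only [List.length_take, List.length_drop]
      omega
    rw [List.foldl_cons]
    simp only [hA1, hA2]
    rw [ih ht]
    simp only [List.map_cons, List.zip_cons_cons, List.flatMap_cons, hB]
    rw [pvIdxGo]
    simp only [List.length_append, hlen, List.append_assoc, List.singleton_append]

-- ===== VERDICT (by name: the statement is the Claim_ definition above) =====
theorem compress_coeff_table_spec : Claim_equal_compress_coeff_table := by
  intro table _ hpre
  unfold Spec_compress_coeff_table
  unfold compress_coeff_table compress_coeff_table_alt
  rw [pvFoldMain table hpre [] []]
  simp [pvFoldlIdx (table.map pvSpanB) [] 0]
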